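-- pv_equiv track=rewrite | github.com/Robotmcgregor/rmb_obs_ras_sheets_pipeline | code/step3_3_integrated_disturbance.py | clearing_cyclone_dieback_fn
-- ===== SOURCE A (Python) =====
-- def clearing_cyclone_dieback_fn(dist_list):
--     """ Determine if any of the three variables within the ordered_list are contained within the photo_list, creating a
--     new ordered list (output_list) (match -> variable, no match -> str(nan).
--
--     :param dist_list: list object containing eight disturbance category variables created under the
--     disturbance_fn function.
--     :return: output_list: ordered list object that was matched from ordered_list variables within the photo_list
--     of three variables: 'clearing', 'cyclone', 'dieback'.
--     """
--
--     ordered_list = ['clearing', 'cyclone', 'dieback']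
--     output_list = []
--     for n in ordered_list:
--         variable = ([elt for elt in dist_list if n in elt])
--         if variable:
--             output_list.extend(variable)
--         else:
--             output_list.extend(['nan'])
--
--     return output_list
-- ===== SOURCE B (Python) =====
-- def clearing_cyclone_dieback_fn(dist_list):
--     """Single pass over dist_list builds a keyword->bucket dict; assembly pass
--     emits each bucket in keyword order, or ['nan'] for an empty bucket."""
--     keywords = ['clearing', 'cyclone', 'dieback']
--     buckets = {k: [] for k in keywords}
--     for elt in dist_list:
--         for k in keywords:
--             if k in elt:
--                 buckets[k].append(elt)
--     output_list = []
--     for k in keywords: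
--         output_list += buckets[k] if buckets[k] else ['nan']
--     return output_list
-- ===== Notes on version B (the rewrite author's own statement) =====
-- stated objective: alternative
-- what changed: Replaces three repeated filter scans of dist_list with a single indexing pass that maintains a dict of per-keyword buckets, followed by a short assembly pass over the three keywords.
import Mathlib
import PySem

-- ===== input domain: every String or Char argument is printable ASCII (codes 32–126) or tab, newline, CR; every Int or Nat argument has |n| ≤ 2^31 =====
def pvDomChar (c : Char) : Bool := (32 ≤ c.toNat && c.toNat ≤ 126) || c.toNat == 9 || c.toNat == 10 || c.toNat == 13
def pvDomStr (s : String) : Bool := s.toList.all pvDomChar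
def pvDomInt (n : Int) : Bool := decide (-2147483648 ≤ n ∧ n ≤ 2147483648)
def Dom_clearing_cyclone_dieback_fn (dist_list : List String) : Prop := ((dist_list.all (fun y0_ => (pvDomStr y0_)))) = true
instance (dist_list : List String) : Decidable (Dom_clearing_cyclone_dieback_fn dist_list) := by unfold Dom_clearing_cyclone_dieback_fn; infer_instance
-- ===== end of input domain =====

-- B replaces A's three repeated filter scans with one dict-indexing pass plus a short assembly pass (alternative decomposition, same cost).


-- ===== PORT A =====
-- A: for each keyword in order, scan dist_list with a filter; extend output with the
-- matches or with ["nan"] if none.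
def clearing_cyclone_dieback_fn (dist_list : List String) : List String :=
  let ordered_list : List String := ["clearing", "cyclone", "dieback"]
  ordered_list.foldl (fun output_list n =>
    let matched := dist_list.filter (fun elt => PySem.Str.isIn n elt)
    if matched ≠ [] then output_list ++ matched else output_list ++ ["nan"]) []

-- ===== PORT B =====
-- B: one pass over dist_list maintaining a keyword -> bucket dict, then an assembly
-- pass over the three keywords.
def pvKeywords : List String := ["clearing", "cyclone", "dieback"]

def clearing_cyclone_dieback_fn_alt (dist_list : List String) : List String :=
  let buckets0 : PySem.Dict String (List String) :=
    pvKeywords.foldl (fun d k => d.insert k []) PySem.Dict.empty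
  let buckets :=
    dist_list.foldl (fun d elt =>
      pvKeywords.foldl (fun d k =>
        if PySem.Str.isIn k elt then d.modify k [] (fun b => b ++ [elt]) else d) d) buckets0
  pvKeywords.foldl (fun output_list k =>
    output_list ++ (if buckets.getD k [] ≠ [] then buckets.getD k [] else ["nan"])) []

-- ===== PRECONDITION & SPEC =====
def Spec_clearing_cyclone_dieback_fn (dist_list : List String) (out : List String) : Prop := out = clearing_cyclone_dieback_fn_alt dist_list
instance (dist_list : List String) (out : List String) : Decidable (Spec_clearing_cyclone_dieback_fn dist_list out) := by unfold Spec_clearing_cyclone_dieback_fn; infer_instance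

-- ===== CLAIM (what is proved, stated in full; the proofs are below) =====
def Claim_equal_clearing_cyclone_dieback_fn : Prop := ∀ (dist_list : List String), Dom_clearing_cyclone_dieback_fn dist_list → Spec_clearing_cyclone_dieback_fn dist_list (clearing_cyclone_dieback_fn dist_list)

-- ===== LEMMAS AND PROOFS =====
def pvStep (d : PySem.Dict String (List String)) (elt : String) : PySem.Dict String (List String) :=
  pvKeywords.foldl (fun d k =>
    if PySem.Str.isIn k elt then d.modify k [] (fun b => b ++ [elt]) else d) d

theorem pvStep_getD (d : PySem.Dict String (List String)) (elt k : String)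
    (hk : k ∈ pvKeywords) :
    (pvStep d elt).getD k [] = d.getD k [] ++ (if PySem.Str.isIn k elt then [elt] else []) := by
  fin_cases hk <;>
    simp only [pvStep, pvKeywords, List.foldl] <;>
    split_ifs <;>
    simp_all [PySem.Dict.getD_modify]

theorem pvBuckets_getD (l : List String) (d : PySem.Dict String (List String)) (k : String)
    (hk : k ∈ pvKeywords) :
    (l.foldl pvStep d).getD k [] = d.getD k [] ++ l.filter (fun elt => PySem.Str.isIn k elt) := by
  induction l generalizing d with
  | nil => simp
  | cons x xs ih =>
    simp only [List.foldl_cons, ih (pvStep d x), pvStep_getD d x k hk, List.filter_cons]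
    split_ifs <;> simp


-- ===== VERDICT (by name: the statement is the Claim_ definition above) =====
theorem clearing_cyclone_dieback_fn_spec : Claim_equal_clearing_cyclone_dieback_fn := by
  intro dist_list _
  simp only [Spec_clearing_cyclone_dieback_fn, clearing_cyclone_dieback_fn,
    clearing_cyclone_dieback_fn_alt]
  rw [show (fun (d : PySem.Dict String (List String)) (elt : String) =>
        pvKeywords.foldl (fun d k =>
          if PySem.Str.isIn k elt then d.modify k [] (fun b => b ++ [elt]) else d) d) = pvStep
      from rfl]
  simp only [pvKeywords, List.foldl]
  rw [pvBuckets_getD dist_list _ "clearing" (by simp [pvKeywords]),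
    pvBuckets_getD dist_list _ "cyclone" (by simp [pvKeywords]),
    pvBuckets_getD dist_list _ "dieback" (by simp [pvKeywords])]
  simp [pvKeywords, List.foldl, PySem.Dict.getD_insert_self, PySem.Dict.getD_insert_of_ne]
  split_ifs <;> simp
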